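-- pv_equiv track=rewrite | github.com/benquick123/code-profiling | code/batch-2/dn5 - tviti/M-17115-1676.py | vse_afne
-- ===== SOURCE A (Python) =====
-- def izloci_besedo(beseda):
--     for i in range(2):
--         for a in beseda:
--             if a.isalnum() == False:
--                 beseda = beseda[1:len(beseda)]
--             else:
--                 break
--         beseda = beseda[::-1]
--     return beseda
--
-- def vse_afne(tviti):
--     izpis=[]
--     for y in tviti:
--         n = y.split(" ")
--         for x in n:
--             if "@" in x:
--                 x = izloci_besedo(x)
--                 if x not in izpis:
--                     izpis.append(x)
--     return izpis
-- ===== SOURCE B (Python) =====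
-- def _trim(s):
--     start = 0
--     n = len(s)
--     while start < n and not s[start].isalnum():
--         start += 1
--     end = n
--     while end > start and not s[end - 1].isalnum():
--         end -= 1
--     return s[start:end]
--
-- def vse_afne(tviti):
--     trimmed = (_trim(x) for y in tviti for x in y.split(" ") if "@" in x)
--     return list(dict.fromkeys(trimmed))
-- ===== Notes on version B (the rewrite author's own statement) =====
-- stated objective: simpler
-- what changed: Edge-trimming is done by one forward and one backward boundary scan instead of A's two reverse-and-delete-from-front loops, and the unique-ordered collection is a flatten/filter/map pipeline deduplicated once via dict.fromkeys instead of nested loops with a linear 'not in' membership append.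
import Mathlib
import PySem

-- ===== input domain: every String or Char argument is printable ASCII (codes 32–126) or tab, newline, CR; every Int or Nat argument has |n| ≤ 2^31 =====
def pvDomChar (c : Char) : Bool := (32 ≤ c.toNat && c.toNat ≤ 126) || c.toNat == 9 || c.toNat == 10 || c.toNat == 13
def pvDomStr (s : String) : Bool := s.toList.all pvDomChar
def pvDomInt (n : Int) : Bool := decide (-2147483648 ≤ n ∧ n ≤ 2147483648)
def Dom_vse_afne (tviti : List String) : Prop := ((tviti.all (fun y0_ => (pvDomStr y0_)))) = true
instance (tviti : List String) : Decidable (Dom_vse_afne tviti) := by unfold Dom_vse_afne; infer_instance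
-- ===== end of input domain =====

-- B replaces A's double reverse-and-delete edge-trimming with one forward and one backward
-- boundary scan, and replaces the nested membership-append loops with flatMap/filter/map
-- followed by an ordered dedup (list(dict.fromkeys(...))); objective: simpler.

-- ===== PORT A =====
-- inner 'for a in beseda: if a.isalnum() == False: beseda = beseda[1:len(beseda)] else: break'
-- (iterates over the SNAPSHOT list while shrinking the state)
def izlociStrip : List Char → List Char → List Char
  | [], b => b
  | a :: rest, b =>
    if PySem.Chars.isalnum a == false then
      izlociStrip rest (PySem.List.slice b (some 1) (some (b.length : Int)))
    else b

def izloci_besedo (beseda : String) : String :=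
  let b0 := beseda.toList
  let b1 := (izlociStrip b0 b0).reverse   -- i = 0: strip pass, then beseda[::-1]
  let b2 := (izlociStrip b1 b1).reverse   -- i = 1: strip pass, then beseda[::-1]
  String.ofList b2

def vse_afne (tviti : List String) : List String :=
  tviti.foldl (fun izpis y =>
    let n := (PySem.Str.split? y " ").getD []   -- y.split(" "); sep ≠ "" so split? is some
    n.foldl (fun izpis x =>
      if PySem.Str.isIn "@" x then
        let x' := izloci_besedo x
        if x' ∈ izpis then izpis else izpis ++ [x']
      else izpis) izpis) []

-- ===== PORT B =====
-- _trim: forward while-loop = dropWhile from the left; backward while-loop = dropWhile on the reverse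
def trimAlt (s : String) : String :=
  let cs := s.toList
  let left := cs.dropWhile (fun c => !PySem.Chars.isalnum c)
  String.ofList ((left.reverse.dropWhile (fun c => !PySem.Chars.isalnum c)).reverse)

def vse_afne_alt (tviti : List String) : List String :=
  PySem.List.dedup
    (((tviti.flatMap (fun y => (PySem.Str.split? y " ").getD [])).filter
        (fun x => PySem.Str.isIn "@" x)).map trimAlt)

-- ===== PRECONDITION & SPEC =====
def Spec_vse_afne (tviti : List String) (out : List String) : Prop := out = vse_afne_alt tviti
instance (tviti : List String) (out : List String) : Decidable (Spec_vse_afne tviti out) := by unfold Spec_vse_afne; infer_instance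

-- ===== CLAIM (what is proved, stated in full; the proofs are below) =====
def Claim_equal_vse_afne : Prop := ∀ (tviti : List String), Dom_vse_afne tviti → Spec_vse_afne tviti (vse_afne tviti)

-- ===== LEMMAS AND PROOFS =====

lemma strip_eq (cs : List Char) :
    izlociStrip cs cs = cs.dropWhile (fun c => !PySem.Chars.isalnum c) := by
  induction cs with
  | nil => rfl
  | cons a rest ih =>
    by_cases h : PySem.Chars.isalnum a
    · simp [izlociStrip, h]
    · have hb : PySem.Chars.isalnum a = false := by simpa using h
      have hsl : PySem.List.slice (a :: rest) (some 1) (some ((rest.length : Int) + 1))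
          = rest := by
        have := PySem.List.slice_natCast (a :: rest) 1 (rest.length + 1)
        push_cast at this
        simpa using this
      simp [izlociStrip, hb, hsl, ih]

lemma trim_eq (s : String) : izloci_besedo s = trimAlt s := by
  simp [izloci_besedo, trimAlt, strip_eq]

lemma fold_step (p : String → Bool) (f : String → String) :
    ∀ (xs acc : List String),
      xs.foldl (fun iz x =>
        if p x then (if f x ∈ iz then iz else iz ++ [f x]) else iz) acc
      = PySem.Set.update acc ((xs.filter p).map f)
  | [], acc => by simp [PySem.Set.update]
  | x :: xs, acc => by
    by_cases hp : p x
    · have hadd : PySem.Set.add acc (f x) = if f x ∈ acc then acc else acc ++ [f x] := by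
        by_cases hm : f x ∈ acc <;> simp [PySem.Set.add, hm]
      by_cases hm : f x ∈ acc <;>
        simp [List.foldl_cons, hp, hm, fold_step p f xs, PySem.Set.update, PySem.Set.add]
    · simp [List.foldl_cons, hp, fold_step p f xs]

lemma foldl_foldl_flatMap {α β γ : Type} (g : β → List α) (f : γ → α → γ) :
    ∀ (l : List β) (a : γ),
      l.foldl (fun a y => (g y).foldl f a) a = (l.flatMap g).foldl f a
  | [], a => rfl
  | y :: l, a => by
    simp [List.foldl_cons, List.flatMap_cons, List.foldl_append, foldl_foldl_flatMap g f l]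

-- ===== VERDICT (by name: the statement is the Claim_ definition above) =====
theorem vse_afne_spec : Claim_equal_vse_afne := by
  intro tviti _
  show vse_afne tviti = vse_afne_alt tviti
  unfold vse_afne vse_afne_alt
  rw [foldl_foldl_flatMap]
  have := fold_step (fun x => PySem.Str.isIn "@" x) izloci_besedo
    (tviti.flatMap (fun y => (PySem.Str.split? y " ").getD [])) []
  simp only [this]
  rw [PySem.Set.update, ← PySem.Set.ofList_eq_foldl, ← PySem.List.dedup_eq_ofList]
  congr 1
  exact List.map_congr_left (fun x _ => trim_eq x)
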